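-- pv_equiv track=rewrite | github.com/Vladimir-Cool/Python_practice | Яндекс/Algorithms/Lisens/Lisen7 Task2.py | maxvisitorsonline
-- ===== SOURCE A (Python) =====
-- def maxvisitorsonline(n, tin, tout):
--     events = []
--     for i in range(n):
--         events.append((tin[i], -1))
--         events.append((tout[i], 1))
--     events.sort()
--     online = 0
--     notymptytime = 0
--     for i in range(len(events)):
--         if online > 0:
--             notymptytime += events[i][0] - events[i - 1][0]
--         if events[i][1] == -1:
--             online += 1
--         else:
--             online -= 1
--     return notymptytime
-- ===== SOURCE B (Python) =====
-- def maxvisitorsonline(n, tin, tout):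
--     # Sort arrival times and departure times independently; an instant u is
--     # covered iff #(arrivals <= u) > #(departures <= u), i.e. iff
--     # starts[k] <= u < ends[k] for some k after sorting both lists.  So the
--     # answer is the measure of the union of the staircase intervals
--     # [starts[k], ends[k]), accumulated in one clamped pass.
--     starts = sorted(tin[i] for i in range(n))
--     ends = sorted(tout[i] for i in range(n))
--     total = 0
--     prev_end = None
--     for s, e in zip(starts, ends):
--         lo = s if prev_end is None else max(s, prev_end)
--         if e > lo:
--             total += e - lo
--         prev_end = e if prev_end is None else max(prev_end, e)
--     return total
-- ===== Notes on version B (the rewrite author's own statement) =====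
-- stated objective: alternative
-- what changed: Replaces the sorted +/-1 event sweep that tracks an open-visitor count by a matched-order pairing: sort arrival times and departure times independently, zip them into staircase intervals [starts[k], ends[k]) and sum the measure of their union in one clamped pass (correct because an instant is covered iff #arrivals<=u exceeds #departures<=u, iff starts[k]<=u<ends[k] for some k).
import Mathlib
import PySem

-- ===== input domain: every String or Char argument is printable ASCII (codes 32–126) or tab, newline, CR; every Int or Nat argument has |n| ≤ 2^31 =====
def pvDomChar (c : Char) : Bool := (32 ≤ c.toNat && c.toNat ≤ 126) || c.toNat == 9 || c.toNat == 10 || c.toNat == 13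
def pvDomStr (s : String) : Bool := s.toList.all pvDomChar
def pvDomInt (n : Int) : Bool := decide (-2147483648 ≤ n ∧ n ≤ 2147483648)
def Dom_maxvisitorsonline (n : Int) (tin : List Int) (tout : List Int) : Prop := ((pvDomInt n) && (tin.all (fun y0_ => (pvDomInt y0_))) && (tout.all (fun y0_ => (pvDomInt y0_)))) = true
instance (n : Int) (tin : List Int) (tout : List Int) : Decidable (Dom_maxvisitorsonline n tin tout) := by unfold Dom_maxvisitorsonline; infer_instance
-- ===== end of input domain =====

-- B sorts arrivals and departures independently and sums the union of the zipped staircase intervals in one clamped pass (alternative algorithm, same cost).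

-- ===== PORT A =====
def maxvisitorsonline (n : Int) (tin : List Int) (tout : List Int) : Int :=
  let events : List (Int × Int) :=
    (PySem.List.pyRange 0 n 1).foldl
      (fun acc i => (acc ++ [(PySem.List.pyGetD tin i 0, (-1 : Int))]) ++ [(PySem.List.pyGetD tout i 0, (1 : Int))]) []
  let evs := PySem.List.sorted2 events Prod.fst Prod.snd
  let st :=
    (PySem.List.pyRange 0 (evs.length : Int) 1).foldl
      (fun (st : Int × Int) i =>
        let noty := if 0 < st.1 then
            st.2 + ((PySem.List.pyGetD evs i ((0:Int),(0:Int))).1 - (PySem.List.pyGetD evs (i-1) ((0:Int),(0:Int))).1)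
          else st.2
        let online := if (PySem.List.pyGetD evs i ((0:Int),(0:Int))).2 == (-1 : Int) then st.1 + 1 else st.1 - 1
        (online, noty)) ((0:Int), (0:Int))
  st.2

-- ===== PORT B =====
def maxvisitorsonline_alt (n : Int) (tin : List Int) (tout : List Int) : Int :=
  let starts := PySem.List.sorted ((PySem.List.pyRange 0 n 1).map (fun i => PySem.List.pyGetD tin i 0)) (fun t => t) false
  let ends := PySem.List.sorted ((PySem.List.pyRange 0 n 1).map (fun i => PySem.List.pyGetD tout i 0)) (fun t => t) false
  let st :=
    (starts.zip ends).foldl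
      (fun (st : Option Int × Int) se =>
        let lo := match st.1 with | none => se.1 | some pe => max se.1 pe
        let total := if lo < se.2 then st.2 + (se.2 - lo) else st.2
        let pe' := match st.1 with | none => se.2 | some pe => max pe se.2
        (some pe', total))
      ((none : Option Int), (0:Int))
  st.2

-- ===== PRECONDITION & SPEC =====
-- Pre_: exactly the inputs where A returns (tin[i]/tout[i] never raise IndexError): n ≤ len(tin) and n ≤ len(tout).
def Pre_maxvisitorsonline (n : Int) (tin : List Int) (tout : List Int) : Prop :=
  n ≤ (tin.length : Int) ∧ n ≤ (tout.length : Int)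
instance (n : Int) (tin : List Int) (tout : List Int) : Decidable (Pre_maxvisitorsonline n tin tout) := by unfold Pre_maxvisitorsonline; infer_instance
def pvWitness_maxvisitorsonline : Int × List Int × List Int := (2, ([1, 4], [3, 5]))

def Spec_maxvisitorsonline (n : Int) (tin : List Int) (tout : List Int) (out : Int) : Prop := out = maxvisitorsonline_alt n tin tout
instance (n : Int) (tin : List Int) (tout : List Int) (out : Int) : Decidable (Spec_maxvisitorsonline n tin tout out) := by unfold Spec_maxvisitorsonline; infer_instance

-- ===== CLAIM (what is proved, stated in full; the proofs are below) =====
def Claim_equal_maxvisitorsonline : Prop := ∀ (n : Int) (tin : List Int) (tout : List Int), Dom_maxvisitorsonline n tin tout → Pre_maxvisitorsonline n tin tout → Spec_maxvisitorsonline n tin tout (maxvisitorsonline n tin tout)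

-- ===== LEMMAS AND PROOFS =====

-- tag helpers: pvTagVal g is the change of the open count caused by an event tag g
def pvTagVal (g : Int) : Int := if g == (-1 : Int) then 1 else -1
def pvTagStep (c g : Int) : Int := if g == (-1 : Int) then c + 1 else c - 1

-- A's sweep, as a recursion over the sorted event list (prev time p, open count c)
def pvHA (p c : Int) : List (Int × Int) → Int
  | [] => 0
  | e :: es => (if 0 < c then e.1 - p else 0) + pvHA e.1 (pvTagStep c e.2) es

-- B's clamped union pass, as a recursion over the zipped interval list (prev end pe)
def pvG (pe : Int) : List (Int × Int) → Int
  | [] => 0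
  | se :: r => (if max se.1 pe < se.2 then se.2 - max se.1 pe else 0) + pvG (max pe se.2) r

def pvSum (b : List (Int × Int)) : Int := (b.map (fun e => pvTagVal e.2)).sum
def pvCnt (l : List Int) (u : Int) : Nat := l.countP (fun x => decide (x ≤ u))
def pvTagLE (S : List (Int × Int)) (u : Int) : Int := pvSum (S.filter (fun e => decide (e.1 ≤ u)))
def pvBefore (a b : Int × Int) : Bool := decide (a.1 < b.1) || (!decide (b.1 < a.1) && decide (a.2 < b.2))
def pvBodyA (evs : List (Int × Int)) (st : Int × Int) (i : Int) : Int × Int :=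
  let noty := if 0 < st.1 then
      st.2 + ((PySem.List.pyGetD evs i ((0:Int),(0:Int))).1 - (PySem.List.pyGetD evs (i-1) ((0:Int),(0:Int))).1)
    else st.2
  let online := if (PySem.List.pyGetD evs i ((0:Int),(0:Int))).2 == (-1 : Int) then st.1 + 1 else st.1 - 1
  (online, noty)
def pvBodyB (st : Option Int × Int) (se : Int × Int) : Option Int × Int :=
  let lo := match st.1 with | none => se.1 | some pe => max se.1 pe
  let total := if lo < se.2 then st.2 + (se.2 - lo) else st.2
  let pe' := match st.1 with | none => se.2 | some pe => max pe se.2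
  (some pe', total)

lemma pvGetD_append (u : List (Int × Int)) (a : Int × Int) (v : List (Int × Int)) (d : Int × Int) :
    PySem.List.pyGetD (u ++ a :: v) ((u.length : Nat) : Int) d = a := by
  rw [PySem.List.pyGetD_natCast]
  simp [List.getD_eq_getElem?_getD]

def pvOnl (c : Int) (l : List (Int × Int)) : Int := l.foldl (fun c e => pvTagStep c e.2) c

lemma pvBridgeA : ∀ (suf pre : List (Int × Int)) (e : Int × Int) (st : Int × Int),
    ((PySem.List.pyRange ((pre.length : Int) + 1) (((pre ++ e :: suf).length : Nat) : Int) 1).foldl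
        (pvBodyA (pre ++ e :: suf)) st)
      = (pvOnl st.1 suf, st.2 + pvHA e.1 st.1 suf) := by
  intro suf
  induction suf with
  | nil =>
    intro pre e st
    rw [PySem.List.pyRange_one_eq_nil
      (by simp only [List.length_append, List.length_cons, List.length_nil]; omega)]
    simp [pvOnl, pvHA]
  | cons f suf' ih =>
    intro pre e st
    rw [PySem.List.pyRange_one_cons
      (by simp only [List.length_append, List.length_cons]; omega)]
    rw [List.foldl_cons]
    have hL : pre ++ e :: f :: suf' = (pre ++ [e]) ++ f :: suf' := by simp
    have h1 : PySem.List.pyGetD (pre ++ e :: f :: suf') ((pre.length : Int) + 1) ((0:Int),(0:Int)) = f := by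
      rw [hL]
      have hc : ((pre.length : Int) + 1) = (((pre ++ [e]).length : Nat) : Int) := by simp
      rw [hc, pvGetD_append]
    have h2 : PySem.List.pyGetD (pre ++ e :: f :: suf') ((pre.length : Int) + 1 - 1) ((0:Int),(0:Int)) = e := by
      have hc : ((pre.length : Int) + 1 - 1) = ((pre.length : Nat) : Int) := by ring
      rw [hc, pvGetD_append]
    have hbody : pvBodyA (pre ++ e :: f :: suf') st ((pre.length : Int) + 1)
        = (pvTagStep st.1 f.2, if 0 < st.1 then st.2 + (f.1 - e.1) else st.2) := by
      simp only [pvBodyA, h1, h2, pvTagStep]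
    rw [hbody]
    have hih := ih (pre ++ [e]) f (pvTagStep st.1 f.2, if 0 < st.1 then st.2 + (f.1 - e.1) else st.2)
    have e1 : (((pre ++ [e]).length : Nat) : Int) + 1 = (pre.length : Int) + 1 + 1 := by simp
    have e2 : (pre ++ [e]) ++ f :: suf' = pre ++ e :: f :: suf' := by simp
    rw [e1, e2] at hih
    rw [hih]
    have hfst : pvOnl (pvTagStep st.1 f.2) suf' = pvOnl st.1 (f :: suf') := by
      simp [pvOnl]
    have hsnd : (if 0 < st.1 then st.2 + (f.1 - e.1) else st.2) + pvHA f.1 (pvTagStep st.1 f.2) suf'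
        = st.2 + pvHA e.1 st.1 (f :: suf') := by
      simp only [pvHA]
      split_ifs <;> ring
    rw [Prod.mk.injEq]
    exact ⟨hfst, hsnd⟩

lemma pvFoldA (S : List (Int × Int)) :
    ((PySem.List.pyRange 0 ((S.length : Nat) : Int) 1).foldl
        (fun (st : Int × Int) i =>
          (if (PySem.List.pyGetD S i ((0:Int),(0:Int))).2 == (-1 : Int) then st.1 + 1 else st.1 - 1,
           if 0 < st.1 then
              st.2 + ((PySem.List.pyGetD S i ((0:Int),(0:Int))).1 - (PySem.List.pyGetD S (i-1) ((0:Int),(0:Int))).1)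
            else st.2))
        ((0:Int),(0:Int))).2
      = pvHA 0 0 S := by
  have hb : (fun (st : Int × Int) i =>
          ((if (PySem.List.pyGetD S i ((0:Int),(0:Int))).2 == (-1 : Int) then st.1 + 1 else st.1 - 1),
           (if 0 < st.1 then
              st.2 + ((PySem.List.pyGetD S i ((0:Int),(0:Int))).1 - (PySem.List.pyGetD S (i-1) ((0:Int),(0:Int))).1)
            else st.2))) = pvBodyA S := rfl
  rw [hb]
  cases S with
  | nil => simp [pvHA, PySem.List.pyRange_one_eq_nil]
  | cons e es =>
    rw [PySem.List.pyRange_one_cons (by simp only [List.length_cons]; push_cast; omega)]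
    rw [List.foldl_cons]
    have h0 : pvBodyA (e :: es) ((0:Int),(0:Int)) 0 = (pvTagStep 0 e.2, 0) := by
      simp [pvBodyA, pvTagStep]
    rw [h0]
    have hbr := pvBridgeA es [] e (pvTagStep 0 e.2, 0)
    simp only [List.nil_append, List.length_nil, Nat.cast_zero, zero_add] at hbr
    simp only [zero_add]
    rw [hbr]
    simp [pvHA]

-- insertion sort with the lexicographic tuple comparison yields pairwise non-inversion
lemma pvInsertBy_pairwise (x : Int × Int) :
    ∀ (l : List (Int × Int)), l.Pairwise (fun a b => pvBefore b a = false) →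
      (PySem.List.insertBy pvBefore x l).Pairwise (fun a b => pvBefore b a = false) := by
  intro l
  induction l with
  | nil => intro _; simp [PySem.List.insertBy]
  | cons y ys ih =>
    intro h
    rw [show PySem.List.insertBy pvBefore x (y :: ys)
        = if pvBefore x y then x :: y :: ys else y :: PySem.List.insertBy pvBefore x ys from by
      simp [PySem.List.insertBy]]
    rcases List.pairwise_cons.1 h with ⟨hy, hys⟩
    by_cases hxy : pvBefore x y = true
    · rw [if_pos hxy]
      refine List.pairwise_cons.2 ⟨?_, h⟩
      intro z hz
      rcases List.mem_cons.1 hz with rfl | hz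
      · simp [pvBefore] at hxy ⊢
        omega
      · have hzy := hy z hz
        simp [pvBefore] at hxy hzy ⊢
        omega
    · rw [if_neg hxy]
      refine List.pairwise_cons.2 ⟨?_, ih hys⟩
      intro z hz
      rcases (PySem.List.mem_insertBy pvBefore x z ys).1 hz with rfl | hz
      · simpa using hxy
      · exact hy z hz

lemma pvSorted2_pairwise (xs : List (Int × Int)) :
    (PySem.List.sorted2 xs Prod.fst Prod.snd false).Pairwise (fun a b => pvBefore b a = false) := by
  have key : ∀ (l : List (Int × Int)) (acc : List (Int × Int)),
      acc.Pairwise (fun a b => pvBefore b a = false) →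
      (l.foldl (fun acc x => PySem.List.insertBy pvBefore x acc) acc).Pairwise
        (fun a b => pvBefore b a = false) := by
    intro l
    induction l with
    | nil => intro acc h; simpa using h
    | cons x l' ih =>
      intro acc h
      exact ih _ (pvInsertBy_pairwise x acc h)
  exact key xs [] (by simp)

lemma pvSorted2_le (xs : List (Int × Int)) :
    (PySem.List.sorted2 xs Prod.fst Prod.snd false).Pairwise (fun a b => a.1 ≤ b.1) := by
  refine (pvSorted2_pairwise xs).imp ?_
  intro a b h
  simp [pvBefore] at h
  omega

-- ---------- generic sum helpers ----------

lemma pvSumIco_le (s p q : Int) (_hpq : p ≤ q) :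
    ((Finset.Ico p q).sum (fun u => if s ≤ u then (1:Int) else 0)) = ((q - max s p).toNat : Int) := by
  classical
  rw [Finset.sum_boole]
  have hf : (Finset.Ico p q).filter (fun u => s ≤ u) = Finset.Ico (max s p) q := by
    ext u
    simp only [Finset.mem_filter, Finset.mem_Ico, max_le_iff]
    omega
  rw [hf, Int.card_Ico]

lemma pvSumIco_const (c p q : Int) (hpq : p ≤ q) :
    ((Finset.Ico p q).sum (fun _ => if 0 < c then (1:Int) else 0)) = (if 0 < c then q - p else 0) := by
  classical
  rw [Finset.sum_const, Int.card_Ico]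
  split_ifs <;> simp
  omega

lemma pvSum_Ico_split (f : Int → Int) {a b c : Int} (hab : a ≤ b) (hbc : b ≤ c) :
    (Finset.Ico a c).sum f = (Finset.Ico a b).sum f + (Finset.Ico b c).sum f := by
  rw [← Finset.Ico_union_Ico_eq_Ico hab hbc,
    Finset.sum_union (Finset.Ico_disjoint_Ico_consecutive a b c)]

-- ---------- A's sweep counts covered instants ----------

lemma pvTagStep_eq (c g : Int) : pvTagStep c g = c + pvTagVal g := by
  simp only [pvTagStep, pvTagVal]; split_ifs <;> ring

lemma pvHA_count : ∀ (S : List (Int × Int)) (p c hi : Int),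
    S.Pairwise (fun a b => a.1 ≤ b.1) → (∀ e ∈ S, p ≤ e.1) → (∀ e ∈ S, e.1 < hi) → p ≤ hi →
    c + pvSum S ≤ 0 →
    pvHA p c S = (Finset.Ico p hi).sum (fun u => if 0 < c + pvTagLE S u then (1:Int) else 0) := by
  intro S
  induction S with
  | nil =>
    intro p c hi _ _ _ _ hc
    simp only [pvSum, List.map_nil, List.sum_nil, add_zero] at hc
    simp only [pvHA, pvTagLE, List.filter_nil, pvSum, List.map_nil, List.sum_nil, add_zero]
    rw [Finset.sum_congr rfl (fun u _ => if_neg (by omega))]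
    simp
  | cons e S' ih =>
    intro p c hi hsort hp hhi hphi hc
    have hpe : p ≤ e.1 := hp e (by simp)
    have hehi : e.1 ≤ hi := le_of_lt (hhi e (by simp))
    rw [pvSum_Ico_split _ hpe hehi]
    have hS'p : ∀ f ∈ S', e.1 ≤ f.1 := (List.pairwise_cons.1 hsort).1
    -- first block: no event time reached yet
    have h1 : (Finset.Ico p e.1).sum (fun u => if 0 < c + pvTagLE (e :: S') u then (1:Int) else 0)
        = (if 0 < c then e.1 - p else 0) := by
      rw [Finset.sum_congr rfl (fun u hu => ?_), pvSumIco_const c p e.1 hpe]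
      have hu' := Finset.mem_Ico.1 hu
      have hfil : (e :: S').filter (fun f => decide (f.1 ≤ u)) = [] := by
        refine List.filter_eq_nil_iff.2 ?_
        intro f hf
        rcases List.mem_cons.1 hf with rfl | hf
        · simp; omega
        · have := hS'p f hf; simp; omega
      simp [pvTagLE, hfil, pvSum]
    -- second block: the head event is counted everywhere
    have h2 : (Finset.Ico e.1 hi).sum (fun u => if 0 < c + pvTagLE (e :: S') u then (1:Int) else 0)
        = pvHA e.1 (pvTagStep c e.2) S' := by
      rw [ih e.1 (pvTagStep c e.2) hi (List.pairwise_cons.1 hsort).2 hS'p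
          (fun f hf => hhi f (by simp [hf])) hehi
          (by rw [pvTagStep_eq]
              simp only [pvSum, List.map_cons, List.sum_cons] at hc ⊢
              omega)]
      refine Finset.sum_congr rfl (fun u hu => ?_)
      have hu' := Finset.mem_Ico.1 hu
      have hfil : (e :: S').filter (fun f => decide (f.1 ≤ u))
          = e :: S'.filter (fun f => decide (f.1 ≤ u)) := by
        rw [List.filter_cons, if_pos (by simp; omega)]
      have : pvTagLE (e :: S') u = pvTagVal e.2 + pvTagLE S' u := by
        simp [pvTagLE, hfil, pvSum]
      rw [this, pvTagStep_eq]
      have harith : c + (pvTagVal e.2 + pvTagLE S' u) = c + pvTagVal e.2 + pvTagLE S' u := by ring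
      rw [harith]
    rw [h1, h2]
    simp [pvHA]

-- pvHA with a zero count ignores its previous-time argument
lemma pvHA_c0 (p q : Int) (S : List (Int × Int)) : pvHA p 0 S = pvHA q 0 S := by
  cases S <;> simp [pvHA]

-- ---------- B's pass counts covered instants ----------

lemma pvG_count : ∀ (L : List (Int × Int)) (pe hi : Int),
    L.Pairwise (fun x y => x.1 ≤ y.1) → L.Pairwise (fun x y => x.2 ≤ y.2) →
    (∀ x ∈ L, pe ≤ x.2) → (∀ x ∈ L, x.2 < hi) → pe ≤ hi →
    pvG pe L = (Finset.Ico pe hi).sum (fun u => if ∃ x ∈ L, x.1 ≤ u ∧ u < x.2 then (1:Int) else 0) := by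
  intro L
  induction L with
  | nil =>
    intro pe hi _ _ _ _ _
    simp [pvG]
  | cons se r ih =>
    intro pe hi h1 h2 hpe hhi hpehi
    obtain ⟨s, e⟩ := se
    have hpee : pe ≤ e := hpe (s, e) (by simp)
    have hehi : e ≤ hi := le_of_lt (hhi (s, e) (by simp))
    have hfst : ∀ x ∈ r, s ≤ x.1 := fun x hx => (List.pairwise_cons.1 h1).1 x hx
    have hsnd : ∀ x ∈ r, e ≤ x.2 := fun x hx => (List.pairwise_cons.1 h2).1 x hx
    rw [pvSum_Ico_split _ hpee hehi]
    have hA : (Finset.Ico pe e).sum (fun u => if ∃ x ∈ (s, e) :: r, x.1 ≤ u ∧ u < x.2 then (1:Int) else 0)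
        = (if max s pe < e then e - max s pe else 0) := by
      rw [Finset.sum_congr rfl (fun u hu => ?_), pvSumIco_le s pe e hpee]
      · omega
      · have hu' := Finset.mem_Ico.1 hu
        refine if_congr ⟨?_, ?_⟩ rfl rfl
        · rintro ⟨x, hx, hxu, hux⟩
          rcases List.mem_cons.1 hx with rfl | hx
          · exact hxu
          · exact le_trans (hfst x hx) hxu
        · intro hs
          exact ⟨(s, e), by simp, hs, hu'.2⟩
    have hB : (Finset.Ico e hi).sum (fun u => if ∃ x ∈ (s, e) :: r, x.1 ≤ u ∧ u < x.2 then (1:Int) else 0)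
        = pvG e r := by
      rw [ih e hi (List.pairwise_cons.1 h1).2 (List.pairwise_cons.1 h2).2 hsnd
          (fun x hx => hhi x (by simp [hx])) hehi]
      refine Finset.sum_congr rfl (fun u hu => ?_)
      have hu' := Finset.mem_Ico.1 hu
      refine if_congr ⟨?_, ?_⟩ rfl rfl
      · rintro ⟨x, hx, hxu, hux⟩
        rcases List.mem_cons.1 hx with rfl | hx
        · exact absurd hux (by omega)
        · exact ⟨x, hx, hxu, hux⟩
      · rintro ⟨x, hx, hxu, hux⟩
        exact ⟨x, by simp [hx], hxu, hux⟩
    rw [hA, hB]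
    have hmax : max pe e = e := max_eq_right hpee
    simp [pvG, hmax]

-- ---------- sorted counting: the staircase characterisation ----------

lemma pvCnt_ge (u : Int) : ∀ (l : List Int), l.Pairwise (· ≤ ·) → ∀ (i : Nat) (h : i < l.length),
    l[i] ≤ u → i + 1 ≤ pvCnt l u := by
  intro l
  induction l with
  | nil => intro _ i h; simp at h
  | cons x l' ih =>
    intro hs i h hle
    cases i with
    | zero =>
      simp only [List.getElem_cons_zero] at hle
      simp [pvCnt, hle]
    | succ j =>
      simp only [List.getElem_cons_succ] at hle
      have hih := ih (List.pairwise_cons.1 hs).2 j (by simpa using Nat.lt_of_succ_lt_succ h) hle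
      have hj : j < l'.length := by simpa using Nat.lt_of_succ_lt_succ h
      have hx : x ≤ u := by
        have hmem : l'[j] ∈ l' := List.getElem_mem hj
        have := (List.pairwise_cons.1 hs).1 _ hmem
        omega
      simp only [pvCnt, List.countP_cons, decide_eq_true_eq, if_pos hx] at hih ⊢
      omega

lemma pvCnt_lt (u : Int) : ∀ (l : List Int), l.Pairwise (· ≤ ·) → ∀ (i : Nat) (h : i < l.length),
    u < l[i] → pvCnt l u ≤ i := by
  intro l
  induction l with
  | nil => intro _ i h; simp at h
  | cons x l' ih =>
    intro hs i h hgt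
    cases i with
    | zero =>
      simp only [List.getElem_cons_zero] at hgt
      have hall : ∀ y ∈ x :: l', ¬ (y ≤ u) := by
        intro y hy
        rcases List.mem_cons.1 hy with rfl | hy
        · omega
        · have := (List.pairwise_cons.1 hs).1 y hy; omega
      have : pvCnt (x :: l') u = 0 := by
        simp only [pvCnt]
        rw [List.countP_eq_zero]
        intro y hy
        simpa using hall y hy
      omega
    | succ j =>
      simp only [List.getElem_cons_succ] at hgt
      have hih := ih (List.pairwise_cons.1 hs).2 j (by simpa using Nat.lt_of_succ_lt_succ h) hgt
      simp only [pvCnt, List.countP_cons] at hih ⊢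
      by_cases hx : (x ≤ u) <;> simp [hx] <;> omega

lemma pvPair_iff (a b : List Int) (ha : a.Pairwise (· ≤ ·)) (hb : b.Pairwise (· ≤ ·))
    (hlen : a.length = b.length) (u : Int) :
    (∃ x ∈ a.zip b, x.1 ≤ u ∧ u < x.2) ↔ pvCnt b u < pvCnt a u := by
  constructor
  · rintro ⟨x, hx, hxu, hux⟩
    obtain ⟨i, hi, hxeq⟩ := List.mem_iff_getElem.1 hx
    have hia : i < a.length := by
      simp only [List.length_zip, hlen, min_self] at hi; omega
    have hib : i < b.length := by omega
    have hxa : a[i] = x.1 := by rw [← hxeq]; simp [List.getElem_zip]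
    have hxb : b[i] = x.2 := by rw [← hxeq]; simp [List.getElem_zip]
    have h1 := pvCnt_ge u a ha i hia (by rw [hxa]; exact hxu)
    have h2 := pvCnt_lt u b hb i hib (by rw [hxb]; exact hux)
    omega
  · intro hlt
    set k := pvCnt b u with hk
    have hka : k < a.length := by
      have := List.countP_le_length (l := a) (p := fun x => decide (x ≤ u))
      simp only [pvCnt] at hlt
      omega
    have hkb : k < b.length := by omega
    have hau : a[k] ≤ u := by
      by_contra hcon
      have := pvCnt_lt u a ha k hka (by omega)
      omega
    have hbu : u < b[k] := by
      by_contra hcon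
      have := pvCnt_ge u b hb k hkb (by omega)
      omega
    refine ⟨(a[k], b[k]), ?_, hau, hbu⟩
    refine List.mem_iff_getElem.2 ⟨k, ?_, ?_⟩
    · simp [List.length_zip, hlen]; omega
    · simp [List.getElem_zip]

-- ---------- tag sums of the event list are count differences ----------

lemma pvSum_append (u v : List (Int × Int)) : pvSum (u ++ v) = pvSum u + pvSum v := by
  simp [pvSum]

lemma pvTagLE_append (u v : List (Int × Int)) (t : Int) :
    pvTagLE (u ++ v) t = pvTagLE u t + pvTagLE v t := by
  simp [pvTagLE, List.filter_append, pvSum]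

lemma pvTagLE_perm {S S' : List (Int × Int)} (h : S.Perm S') (t : Int) :
    pvTagLE S t = pvTagLE S' t := by
  unfold pvTagLE pvSum
  exact List.Perm.sum_eq ((h.filter _).map _)

lemma pvTagLE_flatMap (x y : Int → Int) (u : Int) :
    ∀ l : List Int,
    pvTagLE (l.flatMap (fun i => [(x i, (-1:Int)), (y i, (1:Int))])) u
      = (pvCnt (l.map x) u : Int) - (pvCnt (l.map y) u : Int) := by
  intro l
  induction l with
  | nil => simp [pvTagLE, pvSum, pvCnt]
  | cons i l' ih =>
    rw [List.flatMap_cons, pvTagLE_append, ih]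
    by_cases h1 : x i ≤ u <;> by_cases h2 : y i ≤ u <;>
      simp [pvTagLE, pvSum, pvTagVal, pvCnt, h1, h2] <;> ring

lemma pvSum_perm {S S' : List (Int × Int)} (h : S.Perm S') : pvSum S = pvSum S' := by
  unfold pvSum
  exact List.Perm.sum_eq (h.map _)

lemma pvSum_flatMap (x y : Int → Int) : ∀ l : List Int,
    pvSum (l.flatMap (fun i => [(x i, (-1:Int)), (y i, (1:Int))])) = 0 := by
  intro l
  induction l with
  | nil => simp [pvSum]
  | cons i l' ih =>
    rw [List.flatMap_cons, pvSum_append, ih]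
    simp [pvSum, pvTagVal]

-- event times come from the two projected lists
lemma pvEvTimes (x y : Int → Int) (l : List Int) (e : Int × Int)
    (he : e ∈ l.flatMap (fun i => [(x i, (-1:Int)), (y i, (1:Int))])) :
    e.1 ∈ l.map x ∨ e.1 ∈ l.map y := by
  obtain ⟨i, hi, hmem⟩ := List.mem_flatMap.1 he
  rcases List.mem_cons.1 hmem with rfl | hmem
  · exact Or.inl (List.mem_map.2 ⟨i, hi, rfl⟩)
  · rcases List.mem_singleton.1 hmem with rfl
    exact Or.inr (List.mem_map.2 ⟨i, hi, rfl⟩)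

-- ---------- B's foldl is pvG ----------

lemma pvFoldB_some : ∀ (r : List (Int × Int)) (pe tot : Int),
    (r.foldl pvBodyB (some pe, tot)).2 = tot + pvG pe r := by
  intro r
  induction r with
  | nil => intro pe tot; simp [pvG]
  | cons se r' ih =>
    intro pe tot
    rw [List.foldl_cons]
    have hb : pvBodyB (some pe, tot) se
        = (some (max pe se.2), if max se.1 pe < se.2 then tot + (se.2 - max se.1 pe) else tot) := by
      simp [pvBodyB]
    rw [hb, ih]
    simp only [pvG]
    split_ifs <;> ring

lemma pvFoldB_top (L : List (Int × Int)) (lo0 : Int)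
    (h1 : ∀ x ∈ L, lo0 ≤ x.1) (h2 : ∀ x ∈ L, lo0 ≤ x.2) :
    (L.foldl pvBodyB ((none : Option Int), (0:Int))).2 = pvG lo0 L := by
  cases L with
  | nil => simp [pvG]
  | cons se r =>
    rw [List.foldl_cons]
    have hb : pvBodyB ((none : Option Int), (0:Int)) se
        = (some se.2, if se.1 < se.2 then 0 + (se.2 - se.1) else 0) := by
      simp [pvBodyB]
    rw [hb, pvFoldB_some]
    have hs : lo0 ≤ se.1 := h1 se (by simp)
    have he : lo0 ≤ se.2 := h2 se (by simp)
    have hm1 : max se.1 lo0 = se.1 := max_eq_left hs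
    have hm2 : max lo0 se.2 = se.2 := max_eq_right he
    simp only [pvG, hm1, hm2]
    split_ifs <;> ring

-- ---------- element bounds from Dom and Pre ----------

lemma pvElemBound (xs : List Int) (n : Int) (hall : xs.all (fun y => pvDomInt y) = true)
    (hlen : n ≤ (xs.length : Int)) (v : Int)
    (hv : v ∈ (PySem.List.pyRange 0 n 1).map (fun i => PySem.List.pyGetD xs i 0)) :
    -2147483648 ≤ v ∧ v ≤ 2147483648 := by
  obtain ⟨i, hi, rfl⟩ := List.mem_map.1 hv
  have hi' := (PySem.List.mem_pyRange_one).1 hi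
  have hmem : PySem.List.pyGetD xs i 0 ∈ xs := by
    apply PySem.List.pyGetD_mem
    unfold PySem.Raise.InRange
    omega
  have := List.all_eq_true.1 hall _ hmem
  simpa [pvDomInt] using this

-- ===== VERDICT (by name: the statement is the Claim_ definition above) =====
theorem maxvisitorsonline_spec : Claim_equal_maxvisitorsonline := by
  intro n tin tout hdom hpre
  unfold Spec_maxvisitorsonline
  obtain ⟨hpre1, hpre2⟩ := hpre
  unfold Dom_maxvisitorsonline at hdom
  simp only [Bool.and_eq_true] at hdom
  obtain ⟨⟨_, hdtin⟩, hdtout⟩ := hdom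
  -- names
  set l := PySem.List.pyRange 0 n 1 with hl
  set tinL := l.map (fun i => PySem.List.pyGetD tin i 0) with htinL
  set toutL := l.map (fun i => PySem.List.pyGetD tout i 0) with htoutL
  set ev := l.flatMap (fun i => [(PySem.List.pyGetD tin i 0, (-1:Int)), (PySem.List.pyGetD tout i 0, (1:Int))]) with hev
  set S := PySem.List.sorted2 ev Prod.fst Prod.snd false with hSdef
  set a := PySem.List.sorted tinL (fun t => t) false with hadef
  set b := PySem.List.sorted toutL (fun t => t) false with hbdef
  have hbin : ∀ v ∈ tinL, -2147483648 ≤ v ∧ v ≤ 2147483648 := fun v hv =>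
    pvElemBound tin n hdtin hpre1 v hv
  have hbout : ∀ v ∈ toutL, -2147483648 ≤ v ∧ v ≤ 2147483648 := fun v hv =>
    pvElemBound tout n hdtout hpre2 v hv
  -- A's value is pvHA over the sorted event list
  have hA : maxvisitorsonline n tin tout = pvHA 0 0 S := by
    unfold maxvisitorsonline
    simp only [List.append_assoc, List.singleton_append]
    rw [PySem.List.foldl_append_eq_flatMap]
    simp only [List.nil_append]
    exact pvFoldA _
  -- B's value is pvG over the zipped sorted lists
  have hlen_ab : a.length = b.length := by
    rw [hadef, hbdef, PySem.List.length_sorted, PySem.List.length_sorted,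
      htinL, htoutL, List.length_map, List.length_map]
  have hmemab : ∀ x ∈ a.zip b, (x.1 ∈ tinL ∧ x.2 ∈ toutL) := by
    intro x hx
    obtain ⟨hx1, hx2⟩ := List.of_mem_zip hx
    exact ⟨(PySem.List.mem_sorted _ _ _ _).1 hx1, (PySem.List.mem_sorted _ _ _ _).1 hx2⟩
  have hB : maxvisitorsonline_alt n tin tout = pvG (-2147483649) (a.zip b) := by
    unfold maxvisitorsonline_alt
    rw [show (fun (st : Option Int × Int) (se : Int × Int) =>
        let lo := match st.1 with | none => se.1 | some pe => max se.1 pe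
        let total := if lo < se.2 then st.2 + (se.2 - lo) else st.2
        let pe' := match st.1 with | none => se.2 | some pe => max pe se.2
        (some pe', total)) = pvBodyB from rfl]
    exact pvFoldB_top _ _
      (fun x hx => by have := (hbin _ (hmemab x hx).1).1; omega)
      (fun x hx => by have := (hbout _ (hmemab x hx).2).1; omega)
  -- pairwise facts
  have haP : a.Pairwise (· ≤ ·) := PySem.List.sorted_pairwise tinL (fun t => t)
  have hbP : b.Pairwise (· ≤ ·) := PySem.List.sorted_pairwise toutL (fun t => t)
  have hzfst : (a.zip b).Pairwise (fun x y => x.1 ≤ y.1) := by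
    have hm : (a.zip b).map Prod.fst = a := List.map_fst_zip (le_of_eq hlen_ab)
    have := haP
    rw [← hm] at this
    exact (List.pairwise_map).1 this
  have hzsnd : (a.zip b).Pairwise (fun x y => x.2 ≤ y.2) := by
    have hm : (a.zip b).map Prod.snd = b := List.map_snd_zip (le_of_eq hlen_ab.symm)
    have := hbP
    rw [← hm] at this
    exact (List.pairwise_map).1 this
  -- the common counting form
  have hperm : S.Perm ev := PySem.List.sorted2_perm ev Prod.fst Prod.snd false
  have hScount : pvHA 0 0 S
      = (Finset.Ico (-2147483649 : Int) 2147483649).sum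
          (fun u => if 0 < (0:Int) + pvTagLE S u then (1:Int) else 0) := by
    rw [pvHA_c0 0 (-2147483649) S]
    refine pvHA_count S (-2147483649) 0 2147483649 (pvSorted2_le ev) ?_ ?_ (by omega) ?_
    · intro e heS
      have heEv : e ∈ ev := hperm.mem_iff.1 heS
      rcases pvEvTimes _ _ l e heEv with h | h
      · have := (hbin _ h).1; omega
      · have := (hbout _ h).1; omega
    · intro e heS
      have heEv : e ∈ ev := hperm.mem_iff.1 heS
      rcases pvEvTimes _ _ l e heEv with h | h
      · have := (hbin _ h).2; omega
      · have := (hbout _ h).2; omega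
    · rw [pvSum_perm hperm, hev, pvSum_flatMap]; omega
  have hGcount : pvG (-2147483649) (a.zip b)
      = (Finset.Ico (-2147483649 : Int) 2147483649).sum
          (fun u => if ∃ x ∈ a.zip b, x.1 ≤ u ∧ u < x.2 then (1:Int) else 0) := by
    refine pvG_count (a.zip b) (-2147483649) 2147483649 hzfst hzsnd ?_ ?_ (by omega)
    · intro x hx
      have := (hbout _ (hmemab x hx).2).1; omega
    · intro x hx
      have := (hbout _ (hmemab x hx).2).2; omega
  -- pointwise identity of the two counted predicates
  rw [hA, hB, hScount, hGcount]
  refine Finset.sum_congr rfl (fun u _ => ?_)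
  refine if_congr ?_ rfl rfl
  have htag : pvTagLE S u = (pvCnt tinL u : Int) - (pvCnt toutL u : Int) := by
    rw [pvTagLE_perm hperm u, hev, pvTagLE_flatMap]
  have hca : pvCnt a u = pvCnt tinL u :=
    List.Perm.countP_eq _ (PySem.List.sorted_perm tinL (fun t => t) false)
  have hcb : pvCnt b u = pvCnt toutL u :=
    List.Perm.countP_eq _ (PySem.List.sorted_perm toutL (fun t => t) false)
  rw [htag, pvPair_iff a b haP hbP hlen_ab u, hca, hcb]
  omega
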